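-- pv_equiv track=rewrite | github.com/wesolowskidawid/probabilistic-methods | lab1/lab1.py | generate_multisets
-- ===== SOURCE A (Python) =====
-- def generate_multisets(elements, k):
--     if k == 0:
--         return [[]]
--     result = []
--     for i in range(len(elements)):
--         for subset in generate_multisets(elements[i:], k-1):
--             result.append([elements[i]] + subset)
--     return result
-- ===== SOURCE B (Python) =====
-- def generate_multisets(elements, k):
--     # Bottom-up DP over suffixes instead of recursion:
--     # dp[i] holds the size-j multisets drawn from elements[i:], grown for j = 0..k.
--     dp = [[[]]] * (len(elements) + 1)
--     for _ in range(k):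
--         new = [[]]
--         for i in range(len(elements) - 1, -1, -1):
--             new.insert(0, [[elements[i]] + s for s in dp[i]] + new[0])
--         dp = new
--     return dp[0]
-- ===== Notes on version B (the rewrite author's own statement) =====
-- stated objective: alternative
-- what changed: Replaces the branching recursion (which re-slices and regenerates suffix results inside every recursive call) with a bottom-up dynamic-programming table dp[i] of size-j multisets per suffix, grown k times and shared across entries.
-- outside the precondition, e.g. on generate_multisets([], -1): A returns [], B returns [[]]
import Mathlib
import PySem

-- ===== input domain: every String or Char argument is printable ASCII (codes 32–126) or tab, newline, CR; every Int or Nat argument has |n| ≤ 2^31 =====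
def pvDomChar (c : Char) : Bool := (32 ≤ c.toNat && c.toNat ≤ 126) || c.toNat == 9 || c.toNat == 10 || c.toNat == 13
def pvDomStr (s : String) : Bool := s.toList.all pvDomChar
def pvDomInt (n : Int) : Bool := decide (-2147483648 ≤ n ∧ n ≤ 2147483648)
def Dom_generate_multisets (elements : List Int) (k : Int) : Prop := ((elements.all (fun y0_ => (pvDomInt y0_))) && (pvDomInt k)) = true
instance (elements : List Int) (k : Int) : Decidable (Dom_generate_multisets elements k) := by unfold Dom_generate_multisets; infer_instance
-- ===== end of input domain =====

-- B replaces A's branching recursion by a bottom-up DP table over suffixes (alternative algorithm, same cost; return value only, no mutation).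

-- ===== PORT A =====
-- A recurses on k-1 until k == 0; the recursion is on the Nat value of k (Pre_ restricts to k ≥ 0,
-- where k.toNat is exact).  range(len(elements)) indices i are in range and nonnegative, so
-- elements[i] = elements.getD i 0 and elements[i:] = elements.drop i are exact here.
def generate_multisets_goA (xs : List Int) : Nat → List (List Int)
  | 0 => [[]]
  | n+1 =>
      (List.range xs.length).foldl
        (fun result i =>
          (generate_multisets_goA (xs.drop i) n).foldl
            (fun r subset => r ++ [xs.getD i 0 :: subset]) result) []

def generate_multisets (elements : List Int) (k : Int) : List (List Int) :=
  if k = 0 then [[]] else generate_multisets_goA elements k.toNat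

-- ===== PORT B =====
-- inner loop: for i in range(len(elements)-1, -1, -1): new.insert(0, [[elements[i]] + s for s in dp[i]] + new[0])
-- the descending loop that prepends is a foldr over range(len(elements)); indices are in range, so getD is exact.
def generate_multisets_step (elements : List Int) (dp : List (List (List Int))) : List (List (List Int)) :=
  (List.range elements.length).foldr
    (fun i new => ((dp.getD i []).map (fun s => elements.getD i 0 :: s) ++ new.headD []) :: new)
    [[]]

def generate_multisets_alt (elements : List Int) (k : Int) : List (List Int) :=
  -- dp = [[[]]] * (len(elements)+1); for _ in range(k): dp = step(dp); return dp[0]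
  ((List.range k.toNat).foldl (fun dp _ => generate_multisets_step elements dp)
    (List.replicate (elements.length + 1) [[]])).headD []

-- ===== PRECONDITION & SPEC =====
-- Pre_ excludes negative k, where A hits RecursionError for nonempty elements and, for empty
-- elements, returns [] only as an artefact of the never-entered loop (B returns [[]] there).
def Pre_generate_multisets (elements : List Int) (k : Int) : Prop := 0 ≤ k
instance (elements : List Int) (k : Int) : Decidable (Pre_generate_multisets elements k) := by unfold Pre_generate_multisets; infer_instance
def pvWitness_generate_multisets : List Int × Int := ([1, 2], 2)

def Spec_generate_multisets (elements : List Int) (k : Int) (out : List (List Int)) : Prop := out = generate_multisets_alt elements k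
instance (elements : List Int) (k : Int) (out : List (List Int)) : Decidable (Spec_generate_multisets elements k out) := by unfold Spec_generate_multisets; infer_instance

-- ===== CLAIM (what is proved, stated in full; the proofs are below) =====
def Claim_equal_generate_multisets : Prop := ∀ (elements : List Int) (k : Int), Dom_generate_multisets elements k → Pre_generate_multisets elements k → Spec_generate_multisets elements k (generate_multisets elements k)

-- ===== LEMMAS AND PROOFS =====

-- generic shape of A's nested append loop
theorem foldl_inner_append (g : Nat → List (List Int)) (f : Nat → List Int → List Int) :
    ∀ (l : List Nat) (acc : List (List Int)),
      l.foldl (fun result i => (g i).foldl (fun r s => r ++ [f i s]) result) acc =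
        acc ++ l.flatMap (fun i => (g i).map (f i)) := by
  intro l
  induction l with
  | nil => intro acc; simp
  | cons i l ih =>
      intro acc
      rw [List.foldl_cons, PySem.List.foldl_append_singleton_eq_map, ih, List.flatMap_cons,
        List.append_assoc]

-- A's loop body as a flatMap: unfold one step of the recursion.
theorem goA_succ (xs : List Int) (n : Nat) :
    generate_multisets_goA xs (n+1) =
      (List.range xs.length).flatMap
        (fun i => (generate_multisets_goA (xs.drop i) n).map (fun s => xs.getD i 0 :: s)) := by
  show (List.range xs.length).foldl _ [] = _
  rw [foldl_inner_append (fun i => generate_multisets_goA (xs.drop i) n)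
        (fun i s => xs.getD i 0 :: s) (List.range xs.length) []]
  rfl

theorem goA_nil (n : Nat) : generate_multisets_goA [] (n+1) = [] := by
  rw [goA_succ]; rfl

-- A's recursion on a cons: first element kept or dropped.
theorem goA_cons (x : Int) (rest : List Int) (n : Nat) :
    generate_multisets_goA (x :: rest) (n+1) =
      (generate_multisets_goA (x :: rest) n).map (fun s => x :: s) ++
      generate_multisets_goA rest (n+1) := by
  rw [goA_succ, List.length_cons, List.range_succ_eq_map, List.flatMap_cons,
    goA_succ rest n]
  simp [List.flatMap_map, List.drop_succ_cons]

-- The inner foldr of B, started at suffix position m, computes A's answers for all suffixes from m on.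
theorem step_suffix (elements : List Int) (j : Nat) (dp : List (List (List Int)))
    (hdp : ∀ i, i < elements.length → dp.getD i [] = generate_multisets_goA (elements.drop i) j) :
    ∀ (m c : Nat), m + c = elements.length →
    (List.range' m c).foldr
      (fun i new =>
        ((dp.getD i []).map (fun s => elements.getD i 0 :: s) ++ new.headD []) :: new)
      [[]] =
    (List.range' m c).map (fun i => generate_multisets_goA (elements.drop i) (j+1)) ++ [[]] := by
  intro m c
  induction c generalizing m with
  | zero => intro _; simp
  | succ c ih =>
      intro hmc
      rw [List.range'_succ, List.foldr_cons, ih (m+1) (by omega), List.map_cons, List.cons_append]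
      have hm : m < elements.length := by omega
      rw [hdp m hm]
      have hhead : (((List.range' (m+1) c).map
          (fun i => generate_multisets_goA (elements.drop i) (j+1))) ++
            ([[]] : List (List (List Int)))).headD [] =
          generate_multisets_goA (elements.drop (m+1)) (j+1) := by
        cases c with
        | zero =>
            have h0 : elements.drop (m+1) = [] := List.drop_eq_nil_of_le (by omega)
            simp [h0, goA_nil]
        | succ c' => simp [List.range'_succ]
      rw [hhead]
      -- elements.drop m = elements[m] :: elements.drop (m+1)
      have hdrop : elements.drop m = elements.getD m 0 :: elements.drop (m+1) := by
        rw [List.getD_eq_getElem?_getD, List.getElem?_eq_getElem hm]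
        simpa using (List.drop_eq_getElem_cons hm)
      rw [hdrop, goA_cons, ← hdrop]

-- One B step maps the suffix table for size j to the table for size j+1.
theorem step_table (elements : List Int) (j : Nat) :
    generate_multisets_step elements
      ((List.range (elements.length + 1)).map (fun i => generate_multisets_goA (elements.drop i) j)) =
    (List.range (elements.length + 1)).map (fun i => generate_multisets_goA (elements.drop i) (j+1)) := by
  unfold generate_multisets_step
  have hdp : ∀ i, i < elements.length →
      ((List.range (elements.length + 1)).map
        (fun i => generate_multisets_goA (elements.drop i) j)).getD i [] =
      generate_multisets_goA (elements.drop i) j := by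
    intro i hi
    rw [List.getD_eq_getElem?_getD, List.getElem?_map, List.getElem?_range (by omega)]
    rfl
  rw [show List.range elements.length = List.range' 0 elements.length from List.range_eq_range',
    step_suffix elements j _ hdp 0 elements.length (by omega)]
  rw [List.range_succ, List.map_append,
    show List.range elements.length = List.range' 0 elements.length from List.range_eq_range']
  congr 1
  simp [List.drop_eq_nil_of_le, goA_nil]

-- k B steps from the initial table yield the suffix table for size k.
theorem fold_table (elements : List Int) (m : Nat) :
    (List.range m).foldl (fun dp _ => generate_multisets_step elements dp)
      (List.replicate (elements.length + 1) [[]]) =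
    (List.range (elements.length + 1)).map (fun i => generate_multisets_goA (elements.drop i) m) := by
  induction m with
  | zero =>
      simp only [List.range_zero, List.foldl_nil]
      apply Eq.symm
      rw [List.eq_replicate_iff]
      refine ⟨by simp, ?_⟩
      intro b hb
      rcases List.mem_map.mp hb with ⟨i, _, rfl⟩
      rfl
  | succ m ih =>
      rw [List.range_succ, List.foldl_append, ih]
      simpa using step_table elements m

theorem alt_eq_goA (elements : List Int) (k : Int) :
    generate_multisets_alt elements k = generate_multisets_goA elements k.toNat := by
  unfold generate_multisets_alt
  rw [fold_table, List.range_succ_eq_map]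
  simp

-- ===== VERDICT (by name: the statement is the Claim_ definition above) =====
theorem generate_multisets_spec : Claim_equal_generate_multisets := by
  intro elements k _ hk
  unfold Spec_generate_multisets generate_multisets
  rw [alt_eq_goA]
  split_ifs with h
  · subst h; rfl
  · rfl
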